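-- pv_equiv track=rewrite | github.com/LeeChanghoJJang/Algorithm-Study | 16회차/programmers_214289_에어컨/programmers_214289_윤예리.py | solution
-- ===== SOURCE A (Python) =====
-- def solution(temperature, t1, t2, a, b, onboard):
--     k = 1000 * 100
--
--     t1 += 10
--     t2 += 10
--     temperature += 10
--
--     dp = [[k] * 51 for _ in range(len(onboard))]
--     dp[0][temperature] = 0
--
--     updown = 1
--     if temperature > t2:
--         updown = -1
--
--     for i in range(1, len(onboard)):
--         for j in range(51):
--             arr = [k]
--             if (onboard[i] == 1 and t1 <= j <=t2) or onboard[i] == 0: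
--                 if 0 <= j + updown <= 50:
--                     arr.append(dp[i-1][j+updown])
--                 elif j == temperature:
--                     arr.append(dp[i-1][j])
--                 elif 0 <= j - updown <= 50:
--                     arr.append(dp[i-1][j-updown] + a)
--                 elif t1 <= j <= t2:
--                     arr.append(dp[i-1][j] + b)
--
--                 dp[i][j] = min(arr)
--
--     answer = min(dp[len(onboard)-1])
--     return answer
-- ===== SOURCE B (Python) =====
-- def solution(temperature, t1, t2, a, b, onboard):
--     k = 1000 * 100
--     t1 += 10
--     t2 += 10
--     temperature += 10
--     updown = -1 if temperature > t2 else 1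
--     memo = {}
--
--     def cost(i, j):
--         if i == 0:
--             return 0 if j == temperature else k
--         if (i, j) in memo:
--             return memo[(i, j)]
--         arr = [k]
--         if (onboard[i] == 1 and t1 <= j <= t2) or onboard[i] == 0:
--             if 0 <= j + updown <= 50:
--                 arr.append(cost(i - 1, j + updown))
--             elif j == temperature:
--                 arr.append(cost(i - 1, j))
--             elif 0 <= j - updown <= 50:
--                 arr.append(cost(i - 1, j - updown) + a)
--             elif t1 <= j <= t2:
--                 arr.append(cost(i - 1, j) + b)
--         r = min(arr)
--         memo[(i, j)] = r
--         return r
--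
--     return min(cost(len(onboard) - 1, j) for j in range(51))
-- ===== Notes on version B (the rewrite author's own statement) =====
-- stated objective: alternative
-- what changed: A fills a 51-wide bottom-up DP table row by row and takes the minimum of the last row; B computes the same values by top-down memoized recursion cost(i, j) with the identical exclusive transition chain and minimizes cost(n-1, j) over j.
-- outside the precondition, e.g. on solution(-20, 0, 10, 1, 2, [0, 0]): A returns 0, B returns 100000
import Mathlib
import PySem

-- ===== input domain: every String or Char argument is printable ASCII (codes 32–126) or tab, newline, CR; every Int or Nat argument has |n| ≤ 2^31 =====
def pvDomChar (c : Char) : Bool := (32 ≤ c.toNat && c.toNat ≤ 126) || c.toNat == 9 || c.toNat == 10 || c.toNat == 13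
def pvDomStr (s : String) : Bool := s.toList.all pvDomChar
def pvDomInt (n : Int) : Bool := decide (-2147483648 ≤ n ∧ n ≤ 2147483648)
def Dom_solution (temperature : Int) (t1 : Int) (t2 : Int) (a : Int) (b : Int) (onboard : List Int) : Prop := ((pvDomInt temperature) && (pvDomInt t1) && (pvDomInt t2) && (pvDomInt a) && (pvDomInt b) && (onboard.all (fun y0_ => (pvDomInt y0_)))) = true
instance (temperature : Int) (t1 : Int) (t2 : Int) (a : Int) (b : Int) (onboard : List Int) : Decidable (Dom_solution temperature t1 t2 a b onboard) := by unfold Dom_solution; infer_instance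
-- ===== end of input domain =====

-- B replaces A's bottom-up 51-wide DP table fill by top-down memoised recursion on (row, temperature);
-- objective: alternative decomposition (same exact values, same asymptotic cost).

-- ===== PORT A =====
-- Literal port of A's bottom-up table.  Indices: all reads/writes are in range on Pre_
-- (0 ≤ temperature+10 ≤ 50, onboard ≠ []), so List.getD/.set/.toNat are exact here.
def solution (temperature : Int) (t1 : Int) (t2 : Int) (a : Int) (b : Int) (onboard : List Int) : Int :=
  let k : Int := 1000 * 100
  let t1 := t1 + 10
  let t2 := t2 + 10
  let temperature := temperature + 10
  let n := onboard.length
  let dp : List (List Int) := List.replicate n (List.replicate 51 k)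
  -- dp[0][temperature] = 0  (exact for 0 ≤ temperature ≤ 50, guaranteed by Pre_)
  let dp := dp.set 0 ((dp.getD 0 []).set temperature.toNat 0)
  -- updown = 1; if temperature > t2: updown = -1
  let updown : Int := if temperature > t2 then -1 else 1
  -- for i in range(1, len(onboard)):  (indices 1..n-1, all ≥ 0: List.range' 1 (n-1) is exact)
  let dp := (List.range' 1 (n - 1)).foldl (fun dp i =>
    -- for j in range(51):
    (List.range 51).foldl (fun dp (j : Nat) =>
      let arr : List Int := [k]
      if (onboard.getD i 0 = 1 ∧ t1 ≤ (j : Int) ∧ (j : Int) ≤ t2) ∨ onboard.getD i 0 = 0 then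
        let prev := dp.getD (i - 1) []
        let arr :=
          if 0 ≤ (j : Int) + updown ∧ (j : Int) + updown ≤ 50 then
            arr ++ [prev.getD ((j : Int) + updown).toNat k]
          else if (j : Int) = temperature then
            arr ++ [prev.getD j k]
          else if 0 ≤ (j : Int) - updown ∧ (j : Int) - updown ≤ 50 then
            arr ++ [prev.getD ((j : Int) - updown).toNat k + a]
          else if t1 ≤ (j : Int) ∧ (j : Int) ≤ t2 then
            arr ++ [prev.getD j k + b]
          else arr
        dp.set i ((dp.getD i []).set j ((PySem.List.min? arr (fun x => x)).getD k))
      else dp) dp) dp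
  -- answer = min(dp[len(onboard)-1])  (a 51-element row, never empty)
  (PySem.List.min? (dp.getD (n - 1) []) (fun x => x)).getD 0

-- ===== PORT B =====
-- cost(i, j) of Source B; the memo dict is a pure cache, ported as the same recursion on i.
def costAlt (temperature : Int) (t1 : Int) (t2 : Int) (a : Int) (b : Int)
    (updown : Int) (k : Int) (onboard : List Int) : Nat → Int → Int
  | 0, j => if j = temperature then 0 else k
  | i + 1, j =>
    let arr : List Int := [k]
    let arr :=
      if (onboard.getD (i + 1) 0 = 1 ∧ t1 ≤ j ∧ j ≤ t2) ∨ onboard.getD (i + 1) 0 = 0 then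
        if 0 ≤ j + updown ∧ j + updown ≤ 50 then
          arr ++ [costAlt temperature t1 t2 a b updown k onboard i (j + updown)]
        else if j = temperature then
          arr ++ [costAlt temperature t1 t2 a b updown k onboard i j]
        else if 0 ≤ j - updown ∧ j - updown ≤ 50 then
          arr ++ [costAlt temperature t1 t2 a b updown k onboard i (j - updown) + a]
        else if t1 ≤ j ∧ j ≤ t2 then
          arr ++ [costAlt temperature t1 t2 a b updown k onboard i j + b]
        else arr
      else arr
    (PySem.List.min? arr (fun x => x)).getD k

def solution_alt (temperature : Int) (t1 : Int) (t2 : Int) (a : Int) (b : Int) (onboard : List Int) : Int :=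
  let k : Int := 1000 * 100
  let t1 := t1 + 10
  let t2 := t2 + 10
  let temperature := temperature + 10
  let updown : Int := if temperature > t2 then -1 else 1
  -- min(cost(len(onboard)-1, j) for j in range(51))
  (PySem.List.min?
    ((List.range 51).map (fun (j : Nat) =>
      costAlt temperature t1 t2 a b updown k onboard (onboard.length - 1) (j : Int)))
    (fun x => x)).getD 0

-- ===== PRECONDITION & SPEC =====
-- Pre_ restricts to the problem's natural domain: a non-empty passenger list and a start
-- temperature in −10…40 (so index temperature+10 lands in the 51-slot row).  Outside it A
-- raises IndexError (onboard = [], temperature+10 > 50 or < −51) or, for temperature+10 in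
-- −51…−1, A still returns a value only through accidental negative-index wraparound of the
-- start slot, which no specification would ask for; B starts from an all-k row there.
def Pre_solution (temperature : Int) (t1 : Int) (t2 : Int) (a : Int) (b : Int) (onboard : List Int) : Prop :=
  onboard ≠ [] ∧ 0 ≤ temperature + 10 ∧ temperature + 10 ≤ 50
instance (temperature : Int) (t1 : Int) (t2 : Int) (a : Int) (b : Int) (onboard : List Int) : Decidable (Pre_solution temperature t1 t2 a b onboard) := by unfold Pre_solution; infer_instance

def pvWitness_solution : Int × Int × Int × Int × Int × List Int := (5, 1, 9, 3, 7, [0, 1, 1, 0])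

def Spec_solution (temperature : Int) (t1 : Int) (t2 : Int) (a : Int) (b : Int) (onboard : List Int) (out : Int) : Prop := out = solution_alt temperature t1 t2 a b onboard
instance (temperature : Int) (t1 : Int) (t2 : Int) (a : Int) (b : Int) (onboard : List Int) (out : Int) : Decidable (Spec_solution temperature t1 t2 a b onboard out) := by unfold Spec_solution; infer_instance

-- ===== CLAIM (what is proved, stated in full; the proofs are below) =====
def Claim_equal_solution : Prop := ∀ (temperature : Int) (t1 : Int) (t2 : Int) (a : Int) (b : Int) (onboard : List Int), Dom_solution temperature t1 t2 a b onboard → Pre_solution temperature t1 t2 a b onboard → Spec_solution temperature t1 t2 a b onboard (solution temperature t1 t2 a b onboard)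

-- ===== LEMMAS AND PROOFS =====

-- Helper names for the zeta-reduced bodies of the ports (definitionally equal to them).
abbrev pvG (T1 T2 : Int) (onboard : List Int) (i j : Nat) : Prop :=
  (onboard.getD i 0 = 1 ∧ T1 ≤ (j : Int) ∧ (j : Int) ≤ T2) ∨ onboard.getD i 0 = 0

def pvVal (T T1 T2 a b ud k : Int) (prev : List Int) (j : Nat) : Int :=
  (PySem.List.min?
    (if 0 ≤ (j : Int) + ud ∧ (j : Int) + ud ≤ 50 then [k] ++ [prev.getD ((j : Int) + ud).toNat k]
     else if (j : Int) = T then [k] ++ [prev.getD j k]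
     else if 0 ≤ (j : Int) - ud ∧ (j : Int) - ud ≤ 50 then [k] ++ [prev.getD ((j : Int) - ud).toNat k + a]
     else if T1 ≤ (j : Int) ∧ (j : Int) ≤ T2 then [k] ++ [prev.getD j k + b]
     else [k]) (fun x => x)).getD k

def pvInner (T T1 T2 a b ud k : Int) (onboard : List Int) (i : Nat)
    (dp : List (List Int)) (j : Nat) : List (List Int) :=
  if pvG T1 T2 onboard i j then
    dp.set i ((dp.getD i []).set j (pvVal T T1 T2 a b ud k (dp.getD (i - 1) []) j))
  else dp

def pvRowStep (T T1 T2 a b ud k : Int) (onboard : List Int) (i : Nat) (prev : List Int)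
    (row : List Int) (j : Nat) : List Int :=
  if pvG T1 T2 onboard i j then row.set j (pvVal T T1 T2 a b ud k prev j) else row

def pvRow (T T1 T2 a b ud k : Int) (onboard : List Int) (i : Nat) : List Int :=
  (List.range 51).map (fun (j : Nat) => costAlt T T1 T2 a b ud k onboard i (j : Int))

lemma pv_sol_eq (temperature t1 t2 a b : Int) (onboard : List Int) :
    solution temperature t1 t2 a b onboard =
      (PySem.List.min?
        (((List.range' 1 (onboard.length - 1)).foldl
            (fun dp i => (List.range 51).foldl
              (pvInner (temperature + 10) (t1 + 10) (t2 + 10) a b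
                (if temperature + 10 > t2 + 10 then -1 else 1) (1000 * 100) onboard i) dp)
            ((List.replicate onboard.length (List.replicate 51 ((1000 * 100 : Int)))).set 0
              (((List.replicate onboard.length (List.replicate 51 ((1000 * 100 : Int)))).getD 0 []).set
                (temperature + 10).toNat 0))).getD (onboard.length - 1) [])
        (fun x => x)).getD 0 := rfl

lemma pv_alt_eq (temperature t1 t2 a b : Int) (onboard : List Int) :
    solution_alt temperature t1 t2 a b onboard =
      (PySem.List.min?
        (pvRow (temperature + 10) (t1 + 10) (t2 + 10) a b
          (if temperature + 10 > t2 + 10 then -1 else 1) (1000 * 100) onboard (onboard.length - 1))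
        (fun x => x)).getD 0 := rfl

-- inner fold: the j-loop touches only row i, and builds it by pvRowStep from the frozen rows
lemma pv_inner_fold (T T1 T2 a b ud k : Int) (onboard : List Int) (i : Nat) (hi : 1 ≤ i)
    (js : List Nat) : ∀ dp : List (List Int),
    ((js.foldl (pvInner T T1 T2 a b ud k onboard i) dp).length = dp.length) ∧
    (∀ x, x ≠ i → (js.foldl (pvInner T T1 T2 a b ud k onboard i) dp).getD x [] = dp.getD x []) ∧
    ((js.foldl (pvInner T T1 T2 a b ud k onboard i) dp).getD i [] =
      js.foldl (pvRowStep T T1 T2 a b ud k onboard i (dp.getD (i - 1) [])) (dp.getD i [])) := by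
  induction js with
  | nil => intro dp; exact ⟨rfl, fun _ _ => rfl, rfl⟩
  | cons j rest ih =>
    intro dp
    by_cases g : pvG T1 T2 onboard i j
    · have hstep : pvInner T T1 T2 a b ud k onboard i dp j =
          dp.set i ((dp.getD i []).set j (pvVal T T1 T2 a b ud k (dp.getD (i - 1) []) j)) := by
        simp [pvInner, g]
      set dp' := dp.set i ((dp.getD i []).set j (pvVal T T1 T2 a b ud k (dp.getD (i - 1) []) j)) with hdp'
      have hlen : dp'.length = dp.length := by simp [hdp']
      have hne : ∀ x, x ≠ i → dp'.getD x [] = dp.getD x [] := by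
        intro x hx
        simp [hdp', List.getD_eq_getElem?_getD, List.getElem?_set_ne (by omega : i ≠ x)]
      have hprev : dp'.getD (i - 1) [] = dp.getD (i - 1) [] := hne _ (by omega)
      have hrow : dp'.getD i [] =
          (dp.getD i []).set j (pvVal T T1 T2 a b ud k (dp.getD (i - 1) []) j) := by
        by_cases hi2 : i < dp.length
        · simp [hdp', List.getD_eq_getElem?_getD, List.getElem?_set_self hi2]
        · have h1 : dp.getD i [] = [] := by
            rw [List.getD_eq_getElem?_getD,
              List.getElem?_eq_none (by omega : dp.length ≤ i)]
            rfl
          rw [hdp', h1, List.getD_eq_getElem?_getD,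
            List.getElem?_eq_none (by simp; omega : (dp.set i (([] : List Int).set j (pvVal T T1 T2 a b ud k (dp.getD (i - 1) []) j))).length ≤ i)]
          simp
      obtain ⟨l1, l2, l3⟩ := ih dp'
      refine ⟨?_, ?_, ?_⟩
      · simpa [List.foldl_cons, hstep, ← hdp', hlen] using l1
      · intro x hx
        rw [List.foldl_cons, hstep, l2 x hx, hne x hx]
      · rw [List.foldl_cons, hstep, l3, hprev, hrow, List.foldl_cons]
        congr 1
        simp [pvRowStep, g]
    · have hstep : pvInner T T1 T2 a b ud k onboard i dp j = dp := by simp [pvInner, g]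
      have hstep2 : pvRowStep T T1 T2 a b ud k onboard i (dp.getD (i - 1) []) (dp.getD i []) j =
          dp.getD i [] := by simp [pvRowStep, g]
      obtain ⟨l1, l2, l3⟩ := ih dp
      exact ⟨by rw [List.foldl_cons, hstep]; exact l1,
             by intro x hx; rw [List.foldl_cons, hstep]; exact l2 x hx,
             by rw [List.foldl_cons, hstep, List.foldl_cons, hstep2]; exact l3⟩

-- row fold characterisation: each slot is written at most once, from the frozen previous row
lemma pv_row_fold (T T1 T2 a b ud k : Int) (onboard : List Int) (i : Nat) (prev : List Int)
    (m : Nat) (init : List Int) :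
    (((List.range m).foldl (pvRowStep T T1 T2 a b ud k onboard i prev) init).length = init.length) ∧
    (∀ x : Nat, ((List.range m).foldl (pvRowStep T T1 T2 a b ud k onboard i prev) init)[x]? =
      if x < m ∧ x < init.length ∧ pvG T1 T2 onboard i x then
        some (pvVal T T1 T2 a b ud k prev x)
      else init[x]?) := by
  induction m with
  | zero => exact ⟨rfl, by intro x; simp⟩
  | succ m ih =>
    obtain ⟨l1, l2⟩ := ih
    have hstep : (List.range (m + 1)).foldl (pvRowStep T T1 T2 a b ud k onboard i prev) init =
        pvRowStep T T1 T2 a b ud k onboard i prev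
          ((List.range m).foldl (pvRowStep T T1 T2 a b ud k onboard i prev) init) m := by
      rw [List.range_succ, List.foldl_append, List.foldl_cons, List.foldl_nil]
    rw [hstep]
    refine ⟨?_, ?_⟩
    · by_cases g : pvG T1 T2 onboard i m
      · simp only [pvRowStep, if_pos g, List.length_set]; exact l1
      · simp only [pvRowStep, if_neg g]; exact l1
    · intro x
      by_cases g : pvG T1 T2 onboard i m
      · simp only [pvRowStep, if_pos g]
        by_cases hx : x = m
        · subst hx
          by_cases hb : x < init.length
          · rw [List.getElem?_set_self (by rw [l1]; omega)]
            rw [if_pos ⟨by omega, hb, g⟩]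
          · have h2 : init[x]? = none := List.getElem?_eq_none (by omega)
            rw [List.getElem?_eq_none (by rw [List.length_set, l1]; omega),
              if_neg (fun h => hb h.2.1), h2]
        · rw [List.getElem?_set_ne (fun hh => hx hh.symm), l2 x]
          exact if_congr ⟨fun h => ⟨by omega, h.2⟩, fun h => ⟨by omega, h.2⟩⟩ rfl rfl
      · simp only [pvRowStep, if_neg g]
        rw [l2 x]
        by_cases hx : x = m
        · subst hx
          rw [if_neg (fun h => g h.2.2), if_neg (fun h => g h.2.2)]
        · exact if_congr ⟨fun h => ⟨by omega, h.2⟩, fun h => ⟨by omega, h.2⟩⟩ rfl rfl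

-- reading the previous costAlt row at an in-range shifted index
lemma pv_row_read (T T1 T2 a b ud k : Int) (onboard : List Int) (i0 : Nat) (z : Int)
    (h0 : 0 ≤ z) (h1 : z ≤ 50) :
    (pvRow T T1 T2 a b ud k onboard i0).getD z.toNat k =
      costAlt T T1 T2 a b ud k onboard i0 z := by
  have hz : z.toNat < 51 := by omega
  rw [pvRow, List.getD_eq_getElem?_getD, List.getElem?_map, List.getElem?_range hz]
  simp [Int.toNat_of_nonneg h0]

-- the cell transition of A equals one unfolding of costAlt
lemma pv_cell (T T1 T2 a b ud k : Int) (onboard : List Int) (i0 : Nat) (j : Nat) (hj : j < 51) :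
    (if pvG T1 T2 onboard (i0 + 1) j then
        pvVal T T1 T2 a b ud k (pvRow T T1 T2 a b ud k onboard i0) j
      else k) = costAlt T T1 T2 a b ud k onboard (i0 + 1) (j : Int) := by
  by_cases g : pvG T1 T2 onboard (i0 + 1) j
  · rw [if_pos g]
    rw [costAlt]
    rw [if_pos (by exact g)]
    rw [pvVal]
    split_ifs with c1 c2 c3 c4
    · rw [pv_row_read T T1 T2 a b ud k onboard i0 ((j : Int) + ud) c1.1 c1.2]
    · rw [show ((j : Int)) = ((j : Int)) from rfl]
      have : (pvRow T T1 T2 a b ud k onboard i0).getD j k =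
          costAlt T T1 T2 a b ud k onboard i0 (j : Int) := by
        have := pv_row_read T T1 T2 a b ud k onboard i0 (j : Int) (by omega) (by omega)
        simpa using this
      rw [this]
    · rw [pv_row_read T T1 T2 a b ud k onboard i0 ((j : Int) - ud) c3.1 c3.2]
    · have : (pvRow T T1 T2 a b ud k onboard i0).getD j k =
          costAlt T T1 T2 a b ud k onboard i0 (j : Int) := by
        have := pv_row_read T T1 T2 a b ud k onboard i0 (j : Int) (by omega) (by omega)
        simpa using this
      rw [this]
    · rfl
  · rw [if_neg g]
    rw [costAlt]
    rw [if_neg (by exact g)]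
    simp [PySem.List.min?_id_cons]

-- the computed row i (i ≥ 1) is the costAlt row i
lemma pv_row_eq (T T1 T2 a b ud k : Int) (onboard : List Int) (i0 : Nat) :
    (List.range 51).foldl
      (pvRowStep T T1 T2 a b ud k onboard (i0 + 1) (pvRow T T1 T2 a b ud k onboard i0))
      (List.replicate 51 k) = pvRow T T1 T2 a b ud k onboard (i0 + 1) := by
  obtain ⟨l1, l2⟩ := pv_row_fold T T1 T2 a b ud k onboard (i0 + 1)
    (pvRow T T1 T2 a b ud k onboard i0) 51 (List.replicate 51 k)
  apply List.ext_getElem?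
  intro x
  rw [l2]
  by_cases hx : x < 51
  · have hr : (pvRow T T1 T2 a b ud k onboard (i0 + 1))[x]? =
        some (costAlt T T1 T2 a b ud k onboard (i0 + 1) (x : Int)) := by
      rw [pvRow, List.getElem?_map, List.getElem?_range hx]; rfl
    rw [hr, ← pv_cell T T1 T2 a b ud k onboard i0 x hx]
    by_cases g : pvG T1 T2 onboard (i0 + 1) x
    · simp [hx, g]
    · rw [if_neg (fun h => g h.2.2), if_neg g, List.getElem?_replicate, if_pos hx]
  · rw [if_neg (by simp; omega)]
    rw [List.getElem?_eq_none (by simp; omega), pvRow,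
      List.getElem?_eq_none (by simp; omega)]

-- main invariant over the outer loop
lemma pv_outer (T T1 T2 a b ud k : Int) (onboard : List Int) :
    ∀ (cnt s : Nat) (dp : List (List Int)), 1 ≤ s → s + cnt = onboard.length →
    dp.length = onboard.length →
    (∀ x, x < onboard.length →
      dp.getD x [] = if x < s then pvRow T T1 T2 a b ud k onboard x else List.replicate 51 k) →
    ∀ x, x < onboard.length →
      ((List.range' s cnt).foldl
        (fun dp i => (List.range 51).foldl (pvInner T T1 T2 a b ud k onboard i) dp) dp).getD x [] =
        pvRow T T1 T2 a b ud k onboard x := by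
  intro cnt
  induction cnt with
  | zero =>
    intro s dp hs hsum hlen hdp x hx
    rw [List.range'_zero, List.foldl_nil, hdp x hx, if_pos (by omega)]
  | succ cnt ih =>
    intro s dp hs hsum hlen hdp x hx
    rw [List.range'_succ, List.foldl_cons]
    have hsn : s < onboard.length := by omega
    obtain ⟨l1, l2, l3⟩ := pv_inner_fold T T1 T2 a b ud k onboard s hs (List.range 51) dp
    set dp1 := (List.range 51).foldl (pvInner T T1 T2 a b ud k onboard s) dp with hdp1
    have hprev : dp.getD (s - 1) [] = pvRow T T1 T2 a b ud k onboard (s - 1) := by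
      rw [hdp (s - 1) (by omega), if_pos (by omega)]
    have hself : dp.getD s [] = List.replicate 51 k := by
      rw [hdp s hsn, if_neg (by omega)]
    have hrow : dp1.getD s [] = pvRow T T1 T2 a b ud k onboard s := by
      rw [l3, hprev, hself]
      obtain ⟨i0, rfl⟩ : ∃ i0, s = i0 + 1 := ⟨s - 1, by omega⟩
      simpa using pv_row_eq T T1 T2 a b ud k onboard i0
    refine ih (s + 1) dp1 (by omega) (by omega) (by rw [l1, hlen]) ?_ x hx
    intro y hy
    by_cases hys : y = s
    · subst hys; rw [hrow, if_pos (by omega)]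
    · rw [l2 y hys, hdp y hy]
      by_cases h1 : y < s
      · rw [if_pos h1, if_pos (show y < s + 1 by omega)]
      · rw [if_neg h1, if_neg (show ¬ y < s + 1 by omega)]

-- row 0 of A's table equals the costAlt base row (needs 0 ≤ T ≤ 50)
lemma pv_row_zero (T T1 T2 a b ud k : Int) (onboard : List Int) (h0 : 0 ≤ T) (h1 : T ≤ 50) :
    (List.replicate 51 k).set T.toNat 0 = pvRow T T1 T2 a b ud k onboard 0 := by
  apply List.ext_getElem?
  intro x
  by_cases hx : x < 51
  · have hR : costAlt T T1 T2 a b ud k onboard 0 (x : Int) = if (x : Int) = T then 0 else k := by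
      simp only [costAlt]
    rw [pvRow, List.getElem?_map, List.getElem?_range hx]
    simp only [Option.map_some, hR]
    by_cases he : (x : Int) = T
    · have ht : T.toNat = x := by omega
      rw [ht, List.getElem?_set_self (by rw [List.length_replicate]; exact hx), if_pos he]
    · have hne2 : T.toNat ≠ x := by omega
      rw [List.getElem?_set_ne hne2, List.getElem?_replicate, if_pos hx, if_neg he]
  · rw [List.getElem?_eq_none (by rw [List.length_set, List.length_replicate]; omega), pvRow,
      List.getElem?_eq_none (by simp; omega)]

theorem pv_key (temperature t1 t2 a b : Int) (onboard : List Int)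
    (hne : onboard ≠ []) (h0 : 0 ≤ temperature + 10) (h1 : temperature + 10 ≤ 50) :
    solution temperature t1 t2 a b onboard = solution_alt temperature t1 t2 a b onboard := by
  set T := temperature + 10 with hT
  set T1 := t1 + 10
  set T2 := t2 + 10
  set ud : Int := if T > T2 then -1 else 1
  set k : Int := 1000 * 100 with hk
  set n := onboard.length with hn
  have hn1 : 1 ≤ n := by
    rw [hn]; exact List.length_pos_of_ne_nil hne
  rw [pv_sol_eq, pv_alt_eq]
  have hget0 : (List.replicate n (List.replicate 51 k)).getD 0 [] = List.replicate 51 k := by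
    rw [List.getD_eq_getElem?_getD, List.getElem?_replicate, if_pos (show 0 < n by omega)]
    rfl
  have hfin : ((List.range' 1 (n - 1)).foldl
      (fun dp i => (List.range 51).foldl (pvInner T T1 T2 a b ud k onboard i) dp)
      ((List.replicate n (List.replicate 51 k)).set 0
        ((List.replicate n (List.replicate 51 k)).getD 0 [] |>.set T.toNat 0))).getD (n - 1) [] =
      pvRow T T1 T2 a b ud k onboard (n - 1) := by
    apply pv_outer T T1 T2 a b ud k onboard (n - 1) 1 _ le_rfl (by omega)
    · rw [List.length_set, List.length_replicate, hn]
    · intro x hx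
      rw [hget0]
      by_cases hx0 : x = 0
      · subst hx0
        rw [if_pos (by omega), List.getD_eq_getElem?_getD,
          List.getElem?_set_self (by rw [List.length_replicate]; omega)]
        simp only [Option.getD_some]
        exact pv_row_zero T T1 T2 a b ud k onboard h0 h1
      · rw [if_neg (by omega), List.getD_eq_getElem?_getD,
          List.getElem?_set_ne (by omega : (0 : Nat) ≠ x), List.getElem?_replicate,
          if_pos (show x < n by omega)]
        rfl
    · omega
  rw [hfin]

-- ===== VERDICT (by name: the statement is the Claim_ definition above) =====
theorem solution_spec : Claim_equal_solution := by
  intro temperature t1 t2 a b onboard _ hpre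
  unfold Spec_solution
  exact pv_key temperature t1 t2 a b onboard hpre.1 hpre.2.1 hpre.2.2
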